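-- pv_equiv track=rewrite | github.com/reversebutterfly/sam2-pre-new | memshield/eval_metrics_extended.py | orig_to_attacked_indices
-- ===== SOURCE A (Python) =====
-- from typing import Dict, List, Optional, Sequence, Tuple
--
-- def orig_to_attacked_indices(
--     W_clean: Sequence[int], T_clean: int,
-- ) -> List[int]:
--     """Map each original-clip frame index `c` to its attacked-video position.
--
--     The convention (matching `build_processed`): an insert at clean-space
--     position `w_clean` appears BEFORE original frame `w_clean` in the
--     attacked video. So if we have W_clean = [2, 12], the attacked
--     sequence looks like
--
--         [F0, F1, D0, F2, F3, ..., F11, D1, F12, F13, ...]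
--
--     and original frame `c` ends up at attacked index
--     `t = c + #{w_clean in W_clean : w_clean <= c}`.
--
--     Args:
--       W_clean: insert positions in clean-space (sorted or unsorted).
--       T_clean: number of original-clip frames.
--
--     Returns:
--       List of length T_clean with attacked-video index per original frame.
--     """
--     W_sorted = sorted(int(w) for w in W_clean)
--     result: List[int] = []
--     for c in range(int(T_clean)):
--         n_before = sum(1 for w in W_sorted if w <= c)
--         result.append(c + n_before)
--     return result
-- ===== SOURCE B (Python) =====
-- from typing import List, Sequence
--
--
-- def orig_to_attacked_indices(
--     W_clean: Sequence[int], T_clean: int,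
-- ) -> List[int]:
--     """Same mapping, computed with a single two-pointer sweep: sort the
--     insert positions once, then advance a pointer j so that j is always
--     the number of inserts <= c; each frame maps to c + j."""
--     ws = sorted(int(w) for w in W_clean)
--     n = len(ws)
--     out: List[int] = []
--     j = 0
--     for c in range(int(T_clean)):
--         while j < n and ws[j] <= c:
--             j += 1
--         out.append(c + j)
--     return out
-- ===== Notes on version B (the rewrite author's own statement) =====
-- stated objective: faster
-- what changed: Replaced the per-frame full scan of the sorted insert list (a fresh count for every c) by a single two-pointer sweep: one pointer over the frames and one monotone pointer over the sorted inserts, so each insert is examined once overall.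
import Mathlib
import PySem

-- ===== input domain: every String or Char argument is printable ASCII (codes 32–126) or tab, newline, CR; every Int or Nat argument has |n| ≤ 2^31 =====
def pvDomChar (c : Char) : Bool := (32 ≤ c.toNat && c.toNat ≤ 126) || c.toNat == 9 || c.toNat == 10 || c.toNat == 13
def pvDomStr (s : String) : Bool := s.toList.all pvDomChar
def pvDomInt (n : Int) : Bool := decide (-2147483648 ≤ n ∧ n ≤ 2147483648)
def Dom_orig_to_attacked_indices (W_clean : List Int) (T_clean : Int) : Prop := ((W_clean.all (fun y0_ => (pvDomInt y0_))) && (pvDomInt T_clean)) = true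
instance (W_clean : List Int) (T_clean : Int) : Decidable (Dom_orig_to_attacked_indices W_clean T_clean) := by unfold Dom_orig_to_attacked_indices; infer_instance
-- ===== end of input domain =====

-- B replaces A's per-frame rescan of the sorted insert list by a single
-- two-pointer sweep (each insert consumed once); same return value, proved equal.


-- ===== PORT A =====
-- W_sorted = sorted(int(w) for w in W_clean); for c in range(T): n_before = sum(1 for w in W_sorted if w <= c); result.append(c + n_before)
def orig_to_attacked_indices (W_clean : List Int) (T_clean : Int) : List Int :=
  let W_sorted := PySem.List.sorted W_clean (fun w => w) false
  (PySem.List.pyRange 0 T_clean 1).foldl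
    (fun result c =>
      let n_before := W_sorted.foldl (fun acc w => if w ≤ c then acc + 1 else acc) (0 : Int)
      result ++ [c + n_before]) []

-- ===== PORT B =====
-- inner `while j < n and ws[j] <= c: j += 1`, carried as (remaining suffix of ws, j)
def pvAdvance : List Int → Int → Int → List Int × Int
  | [], j, _ => ([], j)
  | w :: rest, j, c => if w ≤ c then pvAdvance rest (j + 1) c else (w :: rest, j)

-- outer `for c in range(int(T_clean))`, emitting c + j each step
def pvSweep : Nat → Int → List Int → Int → List Int
  | 0, _, _, _ => []
  | k + 1, c, rem, j =>
      let p := pvAdvance rem j c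
      (c + p.2) :: pvSweep k (c + 1) p.1 p.2

def orig_to_attacked_indices_alt (W_clean : List Int) (T_clean : Int) : List Int :=
  let ws := PySem.List.sorted W_clean (fun w => w) false
  pvSweep T_clean.toNat 0 ws 0

-- ===== PRECONDITION & SPEC =====
def Spec_orig_to_attacked_indices (W_clean : List Int) (T_clean : Int) (out : List Int) : Prop := out = orig_to_attacked_indices_alt W_clean T_clean
instance (W_clean : List Int) (T_clean : Int) (out : List Int) : Decidable (Spec_orig_to_attacked_indices W_clean T_clean out) := by unfold Spec_orig_to_attacked_indices; infer_instance

-- ===== CLAIM (what is proved, stated in full; the proofs are below) =====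
def Claim_equal_orig_to_attacked_indices : Prop := ∀ (W_clean : List Int) (T_clean : Int), Dom_orig_to_attacked_indices W_clean T_clean → Spec_orig_to_attacked_indices W_clean T_clean (orig_to_attacked_indices W_clean T_clean)

-- ===== LEMMAS AND PROOFS =====

-- the inner while loop drops the prefix ≤ c and bumps j by its length
theorem pvAdvance_eq (rem : List Int) (j c : Int) :
    pvAdvance rem j c = (rem.dropWhile (fun w => w ≤ c),
      j + ((rem.takeWhile (fun w => w ≤ c)).length : Int)) := by
  induction rem generalizing j with
  | nil => simp [pvAdvance, List.dropWhile, List.takeWhile]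
  | cons w rest ih =>
    by_cases h : w ≤ c
    · simp [pvAdvance, h, ih]
      ring
    · simp [pvAdvance, h]

-- on a (weakly) sorted list, the prefix ≤ c is ALL the elements ≤ c
theorem takeWhile_length_eq_countP (c : Int) (l : List Int)
    (hs : l.Pairwise (· ≤ ·)) :
    (l.takeWhile (fun w => w ≤ c)).length = l.countP (fun w => w ≤ c) := by
  induction l with
  | nil => simp
  | cons w rest ih =>
    rcases List.pairwise_cons.mp hs with ⟨hw, hrest⟩
    by_cases h : w ≤ c
    · simp [h, ih hrest]
    · simp [h]
      symm
      rw [List.countP_eq_zero]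
      intro a ha
      simp only [decide_eq_true_eq]
      exact fun hac => h (le_trans (hw a ha) hac)

-- counting ≤ x (x ≥ c) splits at the prefix ≤ c of a sorted list
theorem countP_split (c x : Int) (hcx : c ≤ x) (l : List Int)
    (hs : l.Pairwise (· ≤ ·)) :
    (l.countP (fun w => w ≤ x) : Int)
      = (l.countP (fun w => w ≤ c) : Int)
        + ((l.dropWhile (fun w => w ≤ c)).countP (fun w => w ≤ x) : Int) := by
  conv_lhs => rw [← List.takeWhile_append_dropWhile (p := fun w => decide (w ≤ c)) (l := l)]
  rw [List.countP_append]
  have h1 : (l.takeWhile (fun w => w ≤ c)).countP (fun w => w ≤ x)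
      = (l.takeWhile (fun w => w ≤ c)).length := by
    rw [List.countP_eq_length]
    intro a ha
    have := List.mem_takeWhile_imp ha
    simp only [decide_eq_true_eq] at this ⊢
    exact le_trans this hcx
  rw [h1, takeWhile_length_eq_countP c l hs]
  push_cast
  ring

-- the sweep, characterised: position x of the attacked range carries j plus the count ≤ x in rem
theorem pvSweep_eq (k : Nat) (c : Int) (rem : List Int) (j : Int)
    (hs : rem.Pairwise (· ≤ ·)) :
    pvSweep k c rem j
      = (PySem.List.pyRange c (c + (k : Int)) 1).map
          (fun x => x + (j + (rem.countP (fun w => w ≤ x) : Int))) := by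
  induction k generalizing c rem j with
  | zero =>
    rw [PySem.List.pyRange_one_eq_nil (by push_cast; omega)]
    rfl
  | succ k ih =>
    rw [pvSweep, pvAdvance_eq]
    have hs' : (rem.dropWhile (fun w => w ≤ c)).Pairwise (· ≤ ·) :=
      List.Pairwise.sublist (List.dropWhile_sublist _) hs
    rw [ih (c + 1) _ _ hs']
    rw [PySem.List.pyRange_one_cons (show c < c + ((k + 1 : Nat) : Int) by push_cast; omega)]
    rw [show c + ((k + 1 : Nat) : Int) = (c + 1) + (k : Int) by push_cast; ring]
    rw [List.map_cons]
    dsimp only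
    refine List.cons_eq_cons.mpr ⟨?_, ?_⟩
    · rw [takeWhile_length_eq_countP c rem hs]
    · apply List.map_congr_left
      intro x hx
      have hcx : c + 1 ≤ x := (PySem.List.mem_pyRange_one.mp hx).1
      rw [takeWhile_length_eq_countP c rem hs]
      have hsplit := countP_split c x (by omega) rem hs
      omega

-- ===== VERDICT (by name: the statement is the Claim_ definition above) =====
theorem orig_to_attacked_indices_spec : Claim_equal_orig_to_attacked_indices := by
  intro W T _
  unfold Spec_orig_to_attacked_indices orig_to_attacked_indices orig_to_attacked_indices_alt
  set ws := PySem.List.sorted W (fun w => w) false with hws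
  have hs : ws.Pairwise (· ≤ ·) := PySem.List.sorted_pairwise W (fun w => w)
  rw [pvSweep_eq T.toNat 0 ws 0 hs]
  rw [PySem.List.foldl_append_singleton_eq_map]
  have hrange : PySem.List.pyRange 0 (0 + (T.toNat : Int)) 1 = PySem.List.pyRange 0 T 1 := by
    by_cases hT : 0 ≤ T
    · rw [Int.toNat_of_nonneg hT, zero_add]
    · rw [PySem.List.pyRange_one_eq_nil (by omega), PySem.List.pyRange_one_eq_nil (by omega)]
  rw [hrange, List.nil_append]
  apply List.map_congr_left
  intro x _
  rw [PySem.List.foldl_ite_add_one]
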